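-- pv_equiv track=rewrite | github.com/joas77/project_euler | solutions/problem17.py | count_str_number
-- ===== SOURCE A (Python) =====
-- NUM_WORDS_MAP = {
--         1: "one",
--         2: "two",
--         3: "three",
--         4: "four",
--         5: "five",
--         6: "six",
--         7: "seven",
--         8: "eight",
--         9: "nine",
--         10: "ten",
--         11: "eleven",
--         12: "twelve",
--         13: "thirteen",
--         14: "fourteen",
--         15: "fifteen",
--         16: "sixteen",
--         17: "seventeen",
--         18: "eighteen",
--         19: "nineteen",
--         20: "twenty",
--         30: "thirty",
--         40: "forty",
--         50: "fifty",
--         60: "sixty",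
--         70: "seventy",
--         80: "eighty",
--         90: "ninety",
--         100: "hundred",
--         1000: "thousand"
-- }
--
-- def count_str_number(n:int)->int:
--     if 1<=n<20:
--         return  len(NUM_WORDS_MAP[n])
--     elif 20<=n<100:
--         return len(NUM_WORDS_MAP[10*(n//10)]) + count_str_number(n%10)
--     elif 100<=n<1000:
--         return len(NUM_WORDS_MAP[100]) + count_str_number(n//100) + len("and") + count_str_number(n%100)
--     elif n==1000:
--         return len(NUM_WORDS_MAP[1]) + len(NUM_WORDS_MAP[1000])
--
--     return 0 # range invalid
-- ===== SOURCE B (Python) =====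
-- SMALL_LEN = [0, 3, 3, 5, 4, 4, 3, 5, 5, 4, 3, 6, 6, 8, 8, 7, 7, 9, 8, 8]
-- TENS_LEN = [0, 0, 6, 6, 5, 5, 5, 7, 6, 6]
--
-- def count_str_number(n: int) -> int:
--     if n == 1000:
--         return 11
--     if not (1 <= n < 1000):
--         return 0
--     total = 0
--     if n >= 100:
--         total += 7 + SMALL_LEN[n // 100] + 3  # "hundred" + word + "and" (always added)
--         n %= 100
--     if n >= 20:
--         total += TENS_LEN[n // 10]
--         n %= 10
--     total += SMALL_LEN[n]
--     return total
-- ===== Notes on version B (the rewrite author's own statement) =====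
-- stated objective: simpler
-- what changed: Replaced the recursive dict-of-words decomposition by a single straight-line iterative pass over precomputed length tables (hundreds, tens, units), accumulating into a total.
import Mathlib
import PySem

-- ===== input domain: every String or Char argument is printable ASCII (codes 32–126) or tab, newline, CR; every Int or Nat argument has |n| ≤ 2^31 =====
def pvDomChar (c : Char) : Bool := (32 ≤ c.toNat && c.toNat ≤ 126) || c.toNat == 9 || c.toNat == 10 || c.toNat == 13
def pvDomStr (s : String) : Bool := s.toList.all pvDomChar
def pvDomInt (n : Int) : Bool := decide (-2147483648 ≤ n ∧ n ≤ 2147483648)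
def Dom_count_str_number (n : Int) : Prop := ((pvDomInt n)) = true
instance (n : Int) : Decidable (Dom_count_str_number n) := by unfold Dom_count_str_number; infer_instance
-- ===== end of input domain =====

-- B replaces A's recursive dict-of-words decomposition by a straight-line pass over
-- precomputed length tables (objective: simpler; same exact values everywhere).

-- ===== PORT A =====
def numWordsMap : PySem.Dict Int String := PySem.Dict.ofList
  [(1, "one"), (2, "two"), (3, "three"), (4, "four"), (5, "five"), (6, "six"),
   (7, "seven"), (8, "eight"), (9, "nine"), (10, "ten"), (11, "eleven"),
   (12, "twelve"), (13, "thirteen"), (14, "fourteen"), (15, "fifteen"),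
   (16, "sixteen"), (17, "seventeen"), (18, "eighteen"), (19, "nineteen"),
   (20, "twenty"), (30, "thirty"), (40, "forty"), (50, "fifty"), (60, "sixty"),
   (70, "seventy"), (80, "eighty"), (90, "ninety"), (100, "hundred"),
   (1000, "thousand")]

-- fuel is only a totality guard: Python's recursion depth is at most 3, and every
-- recursive call below is made with the fuel the Python call tree actually needs.
def csnGo (fuel : Nat) (n : Int) : Int :=
  match fuel with
  | 0 => 0
  | f + 1 =>
    if 1 ≤ n ∧ n < 20 then
      PySem.Str.len (numWordsMap.getD n "")
    else if 20 ≤ n ∧ n < 100 then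
      PySem.Str.len (numWordsMap.getD (10 * PySem.Int.floordiv n 10) "") + csnGo f (PySem.Int.mod n 10)
    else if 100 ≤ n ∧ n < 1000 then
      PySem.Str.len (numWordsMap.getD 100 "") + csnGo f (PySem.Int.floordiv n 100)
        + PySem.Str.len "and" + csnGo f (PySem.Int.mod n 100)
    else if n = 1000 then
      PySem.Str.len (numWordsMap.getD 1 "") + PySem.Str.len (numWordsMap.getD 1000 "")
    else 0

def count_str_number (n : Int) : Int := csnGo 3 n

-- ===== PORT B =====
def smallLen : List Int := [0, 3, 3, 5, 4, 4, 3, 5, 5, 4, 3, 6, 6, 8, 8, 7, 7, 9, 8, 8]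
def tensLen : List Int := [0, 0, 6, 6, 5, 5, 5, 7, 6, 6]

def count_str_number_alt (n : Int) : Int :=
  if n = 1000 then 11
  else if ¬ (1 ≤ n ∧ n < 1000) then 0
  else
    let p1 : Int × Int :=
      if 100 ≤ n then (7 + PySem.List.pyGetD smallLen (PySem.Int.floordiv n 100) 0 + 3, PySem.Int.mod n 100)
      else (0, n)
    let p2 : Int × Int :=
      if 20 ≤ p1.2 then (p1.1 + PySem.List.pyGetD tensLen (PySem.Int.floordiv p1.2 10) 0, PySem.Int.mod p1.2 10)
      else p1
    p2.1 + PySem.List.pyGetD smallLen p2.2 0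

-- ===== PRECONDITION & SPEC =====
def Spec_count_str_number (n : Int) (out : Int) : Prop := out = count_str_number_alt n
instance (n : Int) (out : Int) : Decidable (Spec_count_str_number n out) := by unfold Spec_count_str_number; infer_instance

-- ===== CLAIM (what is proved, stated in full; the proofs are below) =====
def Claim_equal_count_str_number : Prop := ∀ (n : Int), Dom_count_str_number n → Spec_count_str_number n (count_str_number n)

-- ===== LEMMAS AND PROOFS =====

set_option maxRecDepth 100000 in
set_option maxHeartbeats 1000000 in
lemma csn_eq_small : ∀ m : Nat, m < 1001 →
    count_str_number (m : Int) = count_str_number_alt (m : Int) := by decide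

lemma csn_A_out (n : Int) (h : n < 0 ∨ 1000 < n) : count_str_number n = 0 := by
  unfold count_str_number csnGo
  rw [if_neg (by omega), if_neg (by omega), if_neg (by omega), if_neg (by omega)]

lemma csn_B_out (n : Int) (h : n < 0 ∨ 1000 < n) : count_str_number_alt n = 0 := by
  unfold count_str_number_alt
  rw [if_neg (by omega), if_pos (by omega)]

-- ===== VERDICT (by name: the statement is the Claim_ definition above) =====
theorem count_str_number_spec : Claim_equal_count_str_number := by
  intro n _
  unfold Spec_count_str_number
  by_cases h : 0 ≤ n ∧ n ≤ 1000
  · have hn : n = ((n.toNat : Nat) : Int) := by omega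
    rw [hn]
    exact csn_eq_small n.toNat (by omega)
  · rw [csn_A_out n (by omega), csn_B_out n (by omega)]
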